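-- pv_equiv track=rewrite | github.com/ryu19-1/atcoder_python | diverta2019/d/main.py | cal_divisors
-- ===== SOURCE A (Python) =====
-- def cal_divisors(N):
--     divisors = []
--     i = 1
--     while i*i < N:
--         if N % i == 0:
--             divisors.append(i)
--         i += 1
--     divisors.sort()
--     return divisors
-- ===== SOURCE B (Python) =====
-- def cal_divisors(N):
--     # Different algorithm: factorize N by trial division into prime powers,
--     # build the complete divisor list as products over prime-power exponents,
--     # then keep the divisors d with d*d < N, sorted.
--     if N < 2:
--         return []
--     m = N
--     p = 2
--     divs = [1]
--     while p * p <= m: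
--         if m % p == 0:
--             e = 0
--             while m % p == 0:
--                 m //= p
--                 e += 1
--             divs = [d * p**k for d in divs for k in range(e + 1)]
--         p += 1
--     if m > 1:
--         divs = [d * q for d in divs for q in (1, m)]
--     return sorted(d for d in divs if d * d < N)
-- ===== Notes on version B (the rewrite author's own statement) =====
-- stated objective: alternative
-- what changed: B factorizes N into prime powers by trial division and reconstructs the full divisor list as products of prime powers, then filters to d*d < N and sorts, instead of A's single scan testing every i with i*i < N.
import Mathlib
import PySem

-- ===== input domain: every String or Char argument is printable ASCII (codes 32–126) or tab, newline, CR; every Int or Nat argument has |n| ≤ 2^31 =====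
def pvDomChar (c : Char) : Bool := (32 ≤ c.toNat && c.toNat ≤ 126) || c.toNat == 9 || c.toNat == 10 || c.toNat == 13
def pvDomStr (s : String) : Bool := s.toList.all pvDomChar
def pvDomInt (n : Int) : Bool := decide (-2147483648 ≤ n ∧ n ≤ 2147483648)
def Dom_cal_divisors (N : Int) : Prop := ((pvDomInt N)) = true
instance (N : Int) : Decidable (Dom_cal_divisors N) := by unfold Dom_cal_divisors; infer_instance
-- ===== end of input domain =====

-- B replaces A's scan over all i with i*i < N by prime factorization: it factorizes N by
-- trial division, rebuilds the complete divisor list as products of prime powers, then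
-- filters to d*d < N and sorts; alternative algorithm, same return value.

-- ===== PORT A =====
-- the while loop of A: i ascends while i*i < N, appending divisors
theorem pvWhileA_dec (N i : Int) (h : i * i < N) : (N - (i + 1)).toNat < (N - i).toNat := by
  have hii : i ≤ i * i := by nlinarith [mul_self_nonneg (i - 1)]
  omega

def pvWhileA (N i : Int) (divisors : List Int) : List Int :=
  if i * i < N then
    pvWhileA N (i + 1) (if PySem.Int.mod N i == 0 then divisors ++ [i] else divisors)
  else divisors
termination_by (N - i).toNat
decreasing_by exact pvWhileA_dec N i (by assumption)

def cal_divisors (N : Int) : List Int :=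
  PySem.List.sorted (pvWhileA N 1 []) (fun x => x) false

-- ===== PORT B =====
-- inner while of B: divide p out of m, counting the exponent e
-- (fuel makes the recursion structural; m.toNat steps always suffice, see pvExtract_spec)
def pvExtract (fuel : Nat) (m p e : Int) : Int × Int :=
  match fuel with
  | 0 => (m, e)
  | fuel + 1 =>
    if PySem.Int.mod m p = 0 then pvExtract fuel (PySem.Int.floordiv m p) p (e + 1)
    else (m, e)

-- outer while of B: trial division by p = 2, 3, …, multiplying each prime's powers into divs
-- (fuel makes the recursion structural; N.toNat steps always suffice, see pvFact_spec)
def pvFact (fuel : Nat) (m p : Int) (divs : List Int) : List Int × Int :=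
  match fuel with
  | 0 => (divs, m)
  | fuel + 1 =>
    if p * p ≤ m then
      if PySem.Int.mod m p = 0 then
        pvFact fuel (pvExtract m.toNat m p 0).1 (p + 1)
          (divs.flatMap (fun d =>
            (PySem.List.pyRange 0 ((pvExtract m.toNat m p 0).2 + 1) 1).map
              (fun k => d * p ^ k.toNat)))
      else pvFact fuel m (p + 1) divs
    else (divs, m)

def cal_divisors_alt (N : Int) : List Int :=
  if N < 2 then [] else
    let r := pvFact N.toNat N 2 [1]
    let divs := if r.2 > 1 then r.1.flatMap (fun d => [d * 1, d * r.2]) else r.1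
    PySem.List.sorted (divs.filter (fun d => d * d < N)) (fun x => x) false

-- ===== PRECONDITION & SPEC =====
def Spec_cal_divisors (N : Int) (out : List Int) : Prop := out = cal_divisors_alt N
instance (N : Int) (out : List Int) : Decidable (Spec_cal_divisors N out) := by unfold Spec_cal_divisors; infer_instance

-- ===== CLAIM (what is proved, stated in full; the proofs are below) =====
def Claim_equal_cal_divisors : Prop := ∀ (N : Int), Dom_cal_divisors N → Spec_cal_divisors N (cal_divisors N)

-- ===== LEMMAS AND PROOFS =====

-- the inner loop: with enough fuel, m = m' * p ^ k with p ∤ m', and e counts k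
theorem pvExtract_spec : ∀ (fuel : Nat) (m p e : Int), 1 ≤ m → 2 ≤ p → m.toNat ≤ fuel →
    1 ≤ (pvExtract fuel m p e).1 ∧ ¬ p ∣ (pvExtract fuel m p e).1 ∧
      ∃ k : Nat, (pvExtract fuel m p e).2 = e + (k : Int) ∧
        m = (pvExtract fuel m p e).1 * p ^ k := by
  intro fuel
  induction fuel with
  | zero => intro m p e hm hp hf; omega
  | succ fuel ih =>
    intro m p e hm hp hf
    by_cases h : PySem.Int.mod m p = 0
    · have hdvd : p ∣ m := (PySem.Int.mod_eq_zero_iff_dvd m p).mp h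
      have he : PySem.Int.floordiv m p = m / p := PySem.Int.floordiv_eq_ediv_of_pos (by omega)
      have hmp : p * (m / p) = m := Int.mul_ediv_cancel' hdvd
      have hm1 : 1 ≤ m / p := by nlinarith [Int.ediv_nonneg (show 0 ≤ m by omega) (show 0 ≤ p by omega)]
      have hlt : m / p < m := by nlinarith
      rw [pvExtract, if_pos h, he]
      obtain ⟨h1, h2, k, hk1, hk2⟩ := ih (m / p) p (e + 1) hm1 hp (by omega)
      refine ⟨h1, h2, k + 1, by push_cast; omega, ?_⟩
      rw [pow_succ]
      nlinarith [hk2]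
    · rw [pvExtract, if_neg h]
      refine ⟨hm, ?_, 0, by simp, by simp⟩
      intro hdvd
      exact h ((PySem.Int.mod_eq_zero_iff_dvd m p).mpr hdvd)


-- reference: the divisors of N among i, i+1, …, k, in ascending order
def pvSeg (N i k : Int) : List Int :=
  ((List.range (k + 1 - i).toNat).map (fun j : Nat => i + (j : Int))).filter
    (fun d => PySem.Int.mod N d == 0)

theorem pvSeg_empty (N i k : Int) (h : k < i) : pvSeg N i k = [] := by
  unfold pvSeg
  have : (k + 1 - i).toNat = 0 := by omega
  simp [this]

theorem pvSeg_head (N i k : Int) (h : i ≤ k) :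
    pvSeg N i k = (if PySem.Int.mod N i == 0 then [i] else []) ++ pvSeg N (i + 1) k := by
  unfold pvSeg
  have h1 : (k + 1 - i).toNat = (k + 1 - (i + 1)).toNat + 1 := by omega
  rw [h1, List.range_succ_eq_map]
  simp only [List.map_cons, List.map_map]
  have h2 : ((fun j : Nat => i + (j : Int)) ∘ Nat.succ) = (fun j : Nat => (i + 1) + (j : Int)) := by
    funext j; simp; ring
  rw [h2]
  simp only [List.filter_cons]
  by_cases hc : PySem.Int.mod N i == 0 <;> simp [hc]

theorem pvSeg_pairwise (N i k : Int) : (pvSeg N i k).Pairwise (· < ·) := by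
  unfold pvSeg
  refine List.Pairwise.sublist List.filter_sublist ?_
  refine List.pairwise_map.mpr ?_
  refine List.Pairwise.imp ?_ (List.pairwise_lt_range (n := (k + 1 - i).toNat))
  intro a b hab
  omega

theorem mem_pvSeg (N k d : Int) :
    d ∈ pvSeg N 1 k ↔ 1 ≤ d ∧ d ≤ k ∧ PySem.Int.mod N d = 0 := by
  unfold pvSeg
  simp only [List.mem_filter, List.mem_map, List.mem_range, beq_iff_eq]
  constructor
  · rintro ⟨⟨j, hj, rfl⟩, hmod⟩
    exact ⟨by omega, by omega, hmod⟩
  · rintro ⟨h1, h2, hmod⟩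
    exact ⟨⟨d.toNat - 1, by omega, by omega⟩, hmod⟩

-- A's loop accumulates pvSeg i k, when k bounds the loop: ∀ j ≥ 1, j*j < N ↔ j ≤ k
theorem pvWhileA_eq (N k : Int) (hk : ∀ j : Int, 1 ≤ j → (j * j < N ↔ j ≤ k)) :
    ∀ (n : Nat) (i : Int) (divs : List Int), 1 ≤ i → (k + 1 - i).toNat = n →
      pvWhileA N i divs = divs ++ pvSeg N i k := by
  intro n
  induction n with
  | zero =>
    intro i divs hi hn
    have hik : k < i := by omega
    have hlt : ¬ i * i < N := by
      intro h; exact absurd ((hk i hi).mp h) (by omega)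
    rw [pvWhileA, if_neg hlt, pvSeg_empty N i k hik, List.append_nil]
  | succ m ih =>
    intro i divs hi hn
    by_cases hlt : i * i < N
    · have hik : i ≤ k := (hk i hi).mp hlt
      rw [pvWhileA, if_pos hlt, ih (i + 1) _ (by omega) (by omega),
          pvSeg_head N i k hik]
      split <;> simp
    · have hik : k < i := by
        by_contra h
        exact hlt ((hk i hi).mpr (by omega))
      rw [pvWhileA, if_neg hlt, pvSeg_empty N i k hik, List.append_nil]

-- j*j < N ↔ j ≤ ⌊√(N-1)⌋, for j ≥ 1
theorem pv_sqrt_char (N j : Int) (hj : 1 ≤ j) :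
    j * j < N ↔ j ≤ ((Nat.sqrt (N - 1).toNat : Nat) : Int) := by
  have h1 : j ≤ ((Nat.sqrt (N - 1).toNat : Nat) : Int) ↔ j.toNat ≤ Nat.sqrt (N - 1).toNat := by
    omega
  have h2 : j.toNat ≤ Nat.sqrt (N - 1).toNat ↔ j.toNat * j.toNat ≤ (N - 1).toNat := Nat.le_sqrt
  have hc : ((j.toNat * j.toNat : Nat) : Int) = j * j := by push_cast; rw [Int.toNat_of_nonneg (by omega)]
  have hpos : 1 ≤ j * j := by nlinarith
  rw [h1, h2]
  omega

-- a number ≥ 2 whose prime factors are all ≥ itself is prime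
theorem pv_prime_of_min (p m : Int) (hp : 2 ≤ p) (hm : 1 ≤ m) (hdvd : p ∣ m)
    (hmin : ∀ q : Int, Prime q → 0 ≤ q → q ∣ m → p ≤ q) : Prime p := by
  have hq : (p.toNat.minFac : Int) ∣ p := by
    have := Nat.minFac_dvd p.toNat
    have h2 : ((p.toNat : Nat) : Int) = p := by omega
    exact h2 ▸ Int.natCast_dvd_natCast.mpr this
  have hqp : (p.toNat.minFac).Prime := Nat.minFac_prime (by omega)
  have hge : p ≤ (p.toNat.minFac : Int) :=
    hmin _ (Nat.prime_iff_prime_int.mp hqp) (by positivity) (dvd_trans hq hdvd)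
  have hle : p.toNat.minFac ≤ p.toNat := Nat.minFac_le (by omega)
  have heq : (p.toNat.minFac : Int) = p := by omega
  rw [← heq]
  exact Nat.prime_iff_prime_int.mp hqp

-- a number 2 ≤ m < p*p whose prime factors are all ≥ p is prime
theorem pv_prime_of_no_small (p m : Int) (hp : 2 ≤ p) (hm : 2 ≤ m) (hsq : ¬ p * p ≤ m)
    (hmin : ∀ q : Int, Prime q → 0 ≤ q → q ∣ m → p ≤ q) : Prime m := by
  have hq : (m.toNat.minFac : Int) ∣ m := by
    have := Nat.minFac_dvd m.toNat
    have h2 : ((m.toNat : Nat) : Int) = m := by omega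
    exact h2 ▸ Int.natCast_dvd_natCast.mpr this
  have hqp : (m.toNat.minFac).Prime := Nat.minFac_prime (by omega)
  by_cases hmp : m.toNat.Prime
  · have h2 : ((m.toNat : Nat) : Int) = m := by omega
    rw [← h2]
    exact Nat.prime_iff_prime_int.mp hmp
  · exfalso
    have hsqle : m.toNat.minFac ^ 2 ≤ m.toNat := Nat.minFac_sq_le_self (by omega) hmp
    have hge : p ≤ (m.toNat.minFac : Int) :=
      hmin _ (Nat.prime_iff_prime_int.mp hqp) (by positivity) hq
    rw [pow_two] at hsqle
    have h5 : (m.toNat.minFac : Int) * (m.toNat.minFac : Int) ≤ m := by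
      have h6 := hsqle
      have h7 : ((m.toNat.minFac * m.toNat.minFac : Nat) : Int) ≤ ((m.toNat : Nat) : Int) := by
        exact_mod_cast h6
      push_cast at h7
      omega
    nlinarith
  
-- unique representation d₁ * p^k of divisors, p prime not dividing C
theorem pv_rep_unique (C p : Int) (hp : Prime p) (hp2 : 2 ≤ p) (hpC : ¬ p ∣ C)
    (d₁ d₂ : Int) (k₁ k₂ : Nat) (h₁ : d₁ ∣ C) (h₂ : d₂ ∣ C)
    (h : d₁ * p ^ k₁ = d₂ * p ^ k₂) : d₁ = d₂ ∧ k₁ = k₂ := by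
  have key : ∀ (a b : Int) (u v : Nat), a ∣ C → b ∣ C → u ≤ v → a * p ^ u = b * p ^ v → a = b ∧ u = v := by
    intro a b u v ha hb huv heq
    have hpu : (p : Int) ^ u ≠ 0 := by positivity
    have hsplit : b * p ^ v = (b * p ^ (v - u)) * p ^ u := by
      rw [mul_assoc, ← pow_add]
      congr 2
      omega
    have hab : a = b * p ^ (v - u) := by
      apply mul_right_cancel₀ hpu
      rw [heq, hsplit]
    rcases Nat.eq_zero_or_pos (v - u) with h0 | h0
    · rw [h0, pow_zero, mul_one] at hab
      exact ⟨hab, by omega⟩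
    · exfalso
      have hpd : p ∣ a := by
        rw [hab]
        exact Dvd.dvd.mul_left (dvd_pow_self p (by omega)) b
      exact hpC (dvd_trans hpd ha)
  rcases le_total k₁ k₂ with hle | hle
  · exact key d₁ d₂ k₁ k₂ h₁ h₂ hle h
  · obtain ⟨ha, hb⟩ := key d₂ d₁ k₂ k₁ h₂ h₁ hle h.symm
    exact ⟨ha.symm, hb.symm⟩

-- divisors of C * p^K are exactly the products d₁ * p^k, d₁ ∣ C, k ≤ K
theorem pv_dvd_mul_prime_pow (C p : Int) (K : Nat) (hC : 1 ≤ C) (hp : Prime p) (hp2 : 2 ≤ p)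
    (hpC : ¬ p ∣ C) (d : Int) (hd : 1 ≤ d) :
    d ∣ C * p ^ K ↔ ∃ (d₁ : Int) (k : Nat), 1 ≤ d₁ ∧ d₁ ∣ C ∧ k ≤ K ∧ d = d₁ * p ^ k := by
  constructor
  · intro hdvd
    induction K generalizing d with
    | zero =>
      rw [pow_zero, mul_one] at hdvd
      exact ⟨d, 0, hd, hdvd, by omega, by simp⟩
    | succ K ih =>
      by_cases hpd : p ∣ d
      · obtain ⟨d₂, rfl⟩ := hpd
        have hd₂ : 1 ≤ d₂ := by nlinarith
        have hcan : d₂ ∣ C * p ^ K := by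
          have h1 : p * d₂ ∣ p * (C * p ^ K) := by
            have : C * p ^ (K + 1) = p * (C * p ^ K) := by ring
            rw [← this]; exact hdvd
          exact (mul_dvd_mul_iff_left (show p ≠ 0 by omega)).mp h1
        obtain ⟨d₁, k, h1, h2, h3, h4⟩ := ih d₂ hd₂ hcan
        exact ⟨d₁, k + 1, h1, h2, by omega, by rw [h4]; ring⟩
      · have hcop : IsCoprime d (p ^ (K + 1)) :=
          IsCoprime.pow_right ((Prime.coprime_iff_not_dvd hp).mpr hpd).symm
        refine ⟨d, 0, hd, ?_, by omega, by simp⟩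
        exact hcop.dvd_of_dvd_mul_right hdvd
  · rintro ⟨d₁, k, h1, h2, h3, rfl⟩
    exact mul_dvd_mul h2 (pow_dvd_pow p h3)

-- membership in the flatMap of the power products
theorem pv_mem_flat_pow (divs : List Int) (p : Int) (K : Nat) (d' : Int) :
    (d' ∈ divs.flatMap (fun d =>
        (PySem.List.pyRange 0 ((K : Int) + 1) 1).map (fun k => d * p ^ k.toNat)) ↔
      ∃ d ∈ divs, ∃ k : Nat, k ≤ K ∧ d' = d * p ^ k) := by
  simp only [List.mem_flatMap, List.mem_map, PySem.List.mem_pyRange_one]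
  constructor
  · rintro ⟨d, hd, k, ⟨hk0, hk1⟩, rfl⟩
    exact ⟨d, hd, k.toNat, by omega, rfl⟩
  · rintro ⟨d, hd, k, hk, rfl⟩
    exact ⟨d, hd, (k : Int), ⟨by omega, by omega⟩, by simp⟩

-- nodup of the flatMap of the power products
theorem pv_nodup_flat_pow (divs : List Int) (p C : Int) (K : Nat) (hp : Prime p) (hp2 : 2 ≤ p)
    (hpC : ¬ p ∣ C) (hmem : ∀ d ∈ divs, 1 ≤ d ∧ d ∣ C) (hnd : divs.Nodup) :
    (divs.flatMap (fun d =>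
      (PySem.List.pyRange 0 ((K : Int) + 1) 1).map (fun k => d * p ^ k.toNat))).Nodup := by
  rw [List.nodup_flatMap]
  constructor
  · intro d hd
    refine List.Nodup.map_on ?_ (PySem.List.nodup_pyRange_one 0 ((K : Int) + 1))
    intro a ha b hb hab
    rw [PySem.List.mem_pyRange_one] at ha hb
    have hd1 : 1 ≤ d := (hmem d hd).1
    have hpow : (p : Int) ^ a.toNat = p ^ b.toNat := by
      have := mul_left_cancel₀ (show d ≠ 0 by omega) hab
      exact this
    have : a.toNat = b.toNat := by
      by_contra hne
      rcases Nat.lt_or_ge a.toNat b.toNat with h | h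
      · exact absurd hpow (ne_of_lt (Int.pow_lt_pow_of_lt (by omega) h))
      · have h' : b.toNat < a.toNat := by omega
        exact absurd hpow.symm (ne_of_lt (Int.pow_lt_pow_of_lt (by omega) h'))
    omega
  · refine List.Pairwise.imp_of_mem ?_ hnd
    intro d₁ d₂ h₁ h₂ hne x hx₁ hx₂
    simp only [List.mem_map, PySem.List.mem_pyRange_one] at hx₁ hx₂
    obtain ⟨k₁, _, rfl⟩ := hx₁
    obtain ⟨k₂, _, heq⟩ := hx₂
    exact hne (pv_rep_unique C p hp hp2 hpC d₁ d₂ k₁.toNat k₂.toNat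
      (hmem d₁ h₁).2 (hmem d₂ h₂).2 heq.symm).1

-- invariant of pvFact: divs lists exactly the (positive) divisors of the cofactor C,
-- the prime factors of m are ≥ p, those of C are < p
theorem pvFact_spec : ∀ (fuel : Nat) (m p : Int) (divs : List Int) (C : Int),
    (m + 2 - p).toNat ≤ fuel →
    1 ≤ m → 2 ≤ p → 1 ≤ C →
    (∀ q : Int, Prime q → 0 ≤ q → q ∣ m → p ≤ q) →
    (∀ q : Int, Prime q → 0 ≤ q → q ∣ C → q < p) →
    (∀ d : Int, d ∈ divs ↔ 1 ≤ d ∧ d ∣ C) →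
    divs.Nodup →
    ∃ C' p' : Int, 2 ≤ p' ∧ 1 ≤ C' ∧ C' * (pvFact fuel m p divs).2 = C * m ∧
      1 ≤ (pvFact fuel m p divs).2 ∧ ¬ (p' * p' ≤ (pvFact fuel m p divs).2) ∧
      (∀ q : Int, Prime q → 0 ≤ q → q ∣ (pvFact fuel m p divs).2 → p' ≤ q) ∧
      (∀ q : Int, Prime q → 0 ≤ q → q ∣ C' → q < p') ∧
      (∀ d : Int, d ∈ (pvFact fuel m p divs).1 ↔ 1 ≤ d ∧ d ∣ C') ∧
      (pvFact fuel m p divs).1.Nodup := by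
  intro fuel
  induction fuel with
  | zero =>
    intro m p divs C hn hm hp hC hmp hCp hmem hnd
    have hgt : m + 2 ≤ p := by omega
    have hpp : ¬ p * p ≤ m := by nlinarith
    exact ⟨C, p, hp, hC, rfl, hm, hpp, hmp, hCp, hmem, hnd⟩
  | succ fuel ih =>
    intro m p divs C hn hm hp hC hmp hCp hmem hnd
    by_cases h : p * p ≤ m
    · by_cases hd : PySem.Int.mod m p = 0
      · -- dividing branch
        rw [pvFact, if_pos h, if_pos hd]
        have hdvd : p ∣ m := (PySem.Int.mod_eq_zero_iff_dvd m p).mp hd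
        have hprime : Prime p := pv_prime_of_min p m hp hm hdvd hmp
        obtain ⟨h1, h2, k, hk1, hk2⟩ := pvExtract_spec m.toNat m p 0 hm hp (le_refl _)
        set m' := (pvExtract m.toNat m p 0).1 with hm'
        have hk0 : 1 ≤ k := by
          by_contra h0
          have h0' : k = 0 := by omega
          rw [h0', pow_zero, mul_one] at hk2
          exact h2 (by rw [← hk2]; exact hdvd)
        have hpk : p ≤ p ^ k := by
          calc p = p ^ 1 := (pow_one p).symm
            _ ≤ p ^ k := pow_le_pow_right₀ (by omega) hk0
        have hpkpos : 1 ≤ (p : Int) ^ k := one_le_pow₀ (by omega)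
        have hmhalf : 2 * m' ≤ m := by nlinarith [hk2]
        have hpC : ¬ p ∣ C := fun hx => by have := hCp p hprime (by omega) hx; omega
        have hC2 : 1 ≤ C * p ^ k := by nlinarith
        -- rewrite the exponent list bound
        have hr2 : (pvExtract m.toNat m p 0).2 = (k : Int) := by rw [hk1]; ring
        rw [hr2]
        have hmem' : ∀ d : Int,
            (d ∈ divs.flatMap (fun d =>
              (PySem.List.pyRange 0 ((k : Int) + 1) 1).map (fun j => d * p ^ j.toNat)) ↔
            1 ≤ d ∧ d ∣ C * p ^ k) := by
          intro d
          rw [pv_mem_flat_pow]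
          constructor
          · rintro ⟨d₀, hd₀, j, hj, rfl⟩
            obtain ⟨hd₀1, hd₀C⟩ := (hmem d₀).mp hd₀
            have hpj : 1 ≤ (p : Int) ^ j := one_le_pow₀ (by omega)
            exact ⟨by nlinarith, mul_dvd_mul hd₀C (pow_dvd_pow p hj)⟩
          · rintro ⟨hd1, hddvd⟩
            obtain ⟨d₁, j, h1, h2, h3, h4⟩ :=
              (pv_dvd_mul_prime_pow C p k hC hprime hp hpC d hd1).mp hddvd
            exact ⟨d₁, (hmem d₁).mpr ⟨h1, h2⟩, j, h3, h4⟩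
        have hnd' := pv_nodup_flat_pow divs p C k hprime hp hpC
          (fun d hdm => (hmem d).mp hdm) hnd
        obtain ⟨C', p', hh⟩ := ih m' (p + 1) _ (C * p ^ k)
          (by omega) h1 (by omega) hC2
          (by intro q hq hq0 hqd
              have hqm : q ∣ m := by rw [hk2]; exact Dvd.dvd.mul_right hqd _
              have := hmp q hq hq0 hqm
              rcases lt_or_eq_of_le this with hlt | heq
              · omega
              · exfalso; rw [← heq] at hqd; exact h2 hqd)
          (by intro q hq hq0 hqd
              rcases (Prime.dvd_mul hq).mp hqd with hc | hpow
              · have := hCp q hq hq0 hc; omega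
              · have hqp : q ∣ p := Prime.dvd_of_dvd_pow hq hpow
                have : q = p := by
                  have h1' : q.natAbs ∣ p.natAbs := Int.natAbs_dvd_natAbs.mpr hqp
                  have h2' : q.natAbs.Prime := Int.prime_iff_natAbs_prime.mp hq
                  have h3' : p.natAbs.Prime := Int.prime_iff_natAbs_prime.mp hprime
                  have := (Nat.prime_dvd_prime_iff_eq h2' h3').mp h1'
                  omega
                omega)
          hmem' hnd'
        refine ⟨C', p', hh.1, hh.2.1, ?_, hh.2.2.2.1, hh.2.2.2.2.1, hh.2.2.2.2.2.1,
          hh.2.2.2.2.2.2.1, hh.2.2.2.2.2.2.2⟩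
        rw [hh.2.2.1, hk2]
        ring
      · -- non-dividing branch
        rw [pvFact, if_pos h, if_neg hd]
        refine ih m (p + 1) divs C
          (by have : p ≤ m := by nlinarith
              omega)
          hm (by omega) hC
          (by intro q hq hq0 hqd
              have := hmp q hq hq0 hqd
              rcases lt_or_eq_of_le this with hlt | heq
              · omega
              · exfalso
                rw [← heq] at hqd
                exact hd ((PySem.Int.mod_eq_zero_iff_dvd m p).mpr hqd))
          (by intro q hq hq0 hqd; have := hCp q hq hq0 hqd; omega)
          hmem hnd
    · rw [pvFact, if_neg h]
      exact ⟨C, p, hp, hC, rfl, hm, h, hmp, hCp, hmem, hnd⟩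

-- the divisor list built by B lists exactly the positive divisors of N, without duplicates
theorem pv_dlist_spec (N : Int) (hN : 2 ≤ N) :
    ((if (pvFact N.toNat N 2 [1]).2 > 1 then
        (pvFact N.toNat N 2 [1]).1.flatMap (fun d => [d * 1, d * (pvFact N.toNat N 2 [1]).2])
      else (pvFact N.toNat N 2 [1]).1).Nodup) ∧
    (∀ d : Int, d ∈ (if (pvFact N.toNat N 2 [1]).2 > 1 then
        (pvFact N.toNat N 2 [1]).1.flatMap (fun d => [d * 1, d * (pvFact N.toNat N 2 [1]).2])
      else (pvFact N.toNat N 2 [1]).1) ↔ 1 ≤ d ∧ d ∣ N) := by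
  obtain ⟨C', p', hp', hC', hCm, hm1, hsq, hmp, hCp, hmem, hnd⟩ :=
    pvFact_spec N.toNat N 2 [1] 1 (by omega) (by omega) (by omega)
      (by omega)
      (by intro q hq hq0 _
          have := Int.prime_iff_natAbs_prime.mp hq
          have := this.two_le
          omega)
      (by intro q hq _ hqd
          exact absurd (isUnit_of_dvd_one hqd) hq.not_unit)
      (by intro d
          simp only [List.mem_singleton]
          constructor
          · rintro rfl; exact ⟨le_refl 1, dvd_refl 1⟩
          · rintro ⟨h1, h2⟩
            exact le_antisymm (Int.le_of_dvd (by omega) h2) h1)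
      (List.nodup_singleton 1)
  set r := pvFact N.toNat N 2 [1] with hr
  by_cases hcase : r.2 > 1
  · have hmprime : Prime r.2 := pv_prime_of_no_small p' r.2 hp' (by omega) hsq hmp
    have hmC : ¬ r.2 ∣ C' := by
      intro hx
      have h1 := hCp r.2 hmprime (by omega) hx
      have h2 := hmp r.2 hmprime (by omega) (dvd_refl r.2)
      omega
    have hNval : C' * r.2 = N := by rw [hCm]; ring
    rw [if_pos hcase]
    constructor
    · rw [List.nodup_flatMap]
      constructor
      · intro d hdm
        obtain ⟨hd1, _⟩ := (hmem d).mp hdm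
        simp only [List.nodup_cons, List.mem_cons, List.not_mem_nil, List.nodup_nil, and_true,
          or_false]
        refine ⟨fun hx => ?_, not_false⟩
        nlinarith [hx]
      · refine List.Pairwise.imp_of_mem ?_ hnd
        intro d₁ d₂ h₁ h₂ hne x hx₁ hx₂
        simp only [List.mem_cons, List.not_mem_nil, or_false] at hx₁ hx₂
        have e₁ : d₁ * 1 = d₁ * r.2 ^ (0 : Nat) := by simp
        have e₂ : d₁ * r.2 = d₁ * r.2 ^ (1 : Nat) := by simp
        have e₃ : d₂ * 1 = d₂ * r.2 ^ (0 : Nat) := by simp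
        have e₄ : d₂ * r.2 = d₂ * r.2 ^ (1 : Nat) := by simp
        have hd₁C := ((hmem d₁).mp h₁).2
        have hd₂C := ((hmem d₂).mp h₂).2
        rcases hx₁ with rfl | rfl <;> rcases hx₂ with hx | hx
        · exact hne (pv_rep_unique C' r.2 hmprime (by omega) hmC d₁ d₂ 0 0 hd₁C hd₂C
            (by rw [← e₁, ← e₃, hx])).1
        · exact hne (pv_rep_unique C' r.2 hmprime (by omega) hmC d₁ d₂ 0 1 hd₁C hd₂C
            (by rw [← e₁, ← e₄, hx])).1
        · exact hne (pv_rep_unique C' r.2 hmprime (by omega) hmC d₁ d₂ 1 0 hd₁C hd₂C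
            (by rw [← e₂, ← e₃, hx])).1
        · exact hne (pv_rep_unique C' r.2 hmprime (by omega) hmC d₁ d₂ 1 1 hd₁C hd₂C
            (by rw [← e₂, ← e₄, hx])).1
    · intro d
      simp only [List.mem_flatMap, List.mem_cons, List.not_mem_nil, or_false]
      constructor
      · rintro ⟨d₀, hd₀, hx⟩
        obtain ⟨hd₀1, hd₀C⟩ := (hmem d₀).mp hd₀
        rcases hx with rfl | rfl
        · refine ⟨by omega, ?_⟩
          rw [← hNval, mul_one]
          exact Dvd.dvd.mul_right hd₀C r.2
        · refine ⟨by nlinarith, ?_⟩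
          rw [← hNval]
          exact mul_dvd_mul hd₀C (dvd_refl r.2)
      · rintro ⟨hd1, hdN⟩
        have hdvd2 : d ∣ C' * r.2 ^ (1 : Nat) := by rw [pow_one, hNval]; exact hdN
        obtain ⟨d₁, j, h1, h2, h3, h4⟩ :=
          (pv_dvd_mul_prime_pow C' r.2 1 hC' hmprime (by omega) hmC d hd1).mp hdvd2
        refine ⟨d₁, (hmem d₁).mpr ⟨h1, h2⟩, ?_⟩
        interval_cases j
        · left; rw [h4]; simp
        · right; rw [h4]; simp
  · have hm2 : r.2 = 1 := by omega
    have hNval : C' = N := by rw [hm2, mul_one, one_mul] at hCm; exact hCm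
    rw [if_neg hcase, ← hNval]
    exact ⟨hnd, hmem⟩

-- ===== VERDICT (by name: the statement is the Claim_ definition above) =====
theorem cal_divisors_spec : Claim_equal_cal_divisors := by
  intro N _
  unfold Spec_cal_divisors cal_divisors cal_divisors_alt
  by_cases hN : N < 2
  · have h1 : ¬ (1 : Int) * 1 < N := by omega
    rw [pvWhileA, if_neg h1, if_pos hN]
    decide
  · rw [if_neg hN]
    set k : Int := ((Nat.sqrt (N - 1).toNat : Nat) : Int) with hkdef
    have hk : ∀ j : Int, 1 ≤ j → (j * j < N ↔ j ≤ k) := fun j hj => pv_sqrt_char N j hj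
    rw [pvWhileA_eq N k hk (k + 1 - 1).toNat 1 [] (le_refl 1) rfl, List.nil_append]
    obtain ⟨hnd, hmem⟩ := pv_dlist_spec N (by omega)
    have hperm : (pvSeg N 1 k).Perm
        ((if (pvFact N.toNat N 2 [1]).2 > 1 then
            (pvFact N.toNat N 2 [1]).1.flatMap (fun d => [d * 1, d * (pvFact N.toNat N 2 [1]).2])
          else (pvFact N.toNat N 2 [1]).1).filter (fun d => d * d < N)) := by
      rw [List.perm_ext_iff_of_nodup (pvSeg_pairwise N 1 k).nodup (hnd.filter _)]
      intro d
      rw [mem_pvSeg, List.mem_filter]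
      constructor
      · rintro ⟨h1, h2, h3⟩
        have hdN : d ∣ N := (PySem.Int.mod_eq_zero_iff_dvd N d).mp h3
        refine ⟨(hmem d).mpr ⟨h1, hdN⟩, ?_⟩
        simp only [decide_eq_true_eq]
        exact (hk d h1).mpr h2
      · rintro ⟨h1, h2⟩
        obtain ⟨hd1, hdN⟩ := (hmem d).mp h1
        simp only [decide_eq_true_eq] at h2
        exact ⟨hd1, (hk d hd1).mp h2, (PySem.Int.mod_eq_zero_iff_dvd N d).mpr hdN⟩
    calc PySem.List.sorted (pvSeg N 1 k) (fun x => x) false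
        = pvSeg N 1 k :=
          PySem.List.sorted_eq_self_of_pairwise (pvSeg N 1 k) (fun x => x)
            ((pvSeg_pairwise N 1 k).imp (fun {_ _} h => le_of_lt h))
      _ = _ := (PySem.List.sorted_eq_of_perm_of_pairwise_lt _ (pvSeg N 1 k) (fun x => x) hperm
            (pvSeg_pairwise N 1 k)).symm
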